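-- pv_equiv track=rewrite | github.com/AdityaB09/p2_flask | project_p2_light.py | get_dep_categories
-- ===== SOURCE A (Python) =====
-- def get_dep_categories(parsed_input):
--     num_nsubj = 0
--     num_obj = 0
--     num_iobj = 0
--     num_nmod = 0
--     num_amod = 0
--
--     # Write your code here:
--     for i in parsed_input.splitlines():
--         i = i.strip()
--         if not i:
--             continue
--         parts = i.split()
--         if len(parts) < 4:
--             continue
--         rel = parts[-1]
--
--         if rel.startswith("nsubj"):
--             num_nsubj += 1
--
--         if rel.startswith("iobj"):
--             num_iobj += 1
--
--         if (rel == "obj" or rel == "dobj" or rel.startswith("obj:") or rel.startswith("dobj:")):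
--             num_obj += 1
--
--         if rel.startswith("nmod"):
--             num_nmod += 1
--
--         if rel.startswith("amod"):
--             num_amod += 1
--
--     return num_nsubj, num_obj, num_iobj, num_nmod, num_amod
-- ===== SOURCE B (Python) =====
-- def get_dep_categories(parsed_input):
--     # Extract the final token of every surviving line once, then aggregate each
--     # category independently over that list.
--     rels = []
--     for line in parsed_input.splitlines():
--         parts = line.strip().split()
--         if len(parts) >= 4:
--             rels.append(parts[-1])
--     num_nsubj = sum(1 for r in rels if r.startswith("nsubj"))
--     num_obj = sum(1 for r in rels
--                   if r == "obj" or r == "dobj"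
--                   or r.startswith("obj:") or r.startswith("dobj:"))
--     num_iobj = sum(1 for r in rels if r.startswith("iobj"))
--     num_nmod = sum(1 for r in rels if r.startswith("nmod"))
--     num_amod = sum(1 for r in rels if r.startswith("amod"))
--     return num_nsubj, num_obj, num_iobj, num_nmod, num_amod
-- ===== Notes on version B (the rewrite author's own statement) =====
-- stated objective: alternative
-- what changed: A counts all five categories inside one fused loop with five mutable counters; B first extracts the list of final tokens of the surviving lines and then computes each of the five counts as an independent aggregation over that list.
import Mathlib
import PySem

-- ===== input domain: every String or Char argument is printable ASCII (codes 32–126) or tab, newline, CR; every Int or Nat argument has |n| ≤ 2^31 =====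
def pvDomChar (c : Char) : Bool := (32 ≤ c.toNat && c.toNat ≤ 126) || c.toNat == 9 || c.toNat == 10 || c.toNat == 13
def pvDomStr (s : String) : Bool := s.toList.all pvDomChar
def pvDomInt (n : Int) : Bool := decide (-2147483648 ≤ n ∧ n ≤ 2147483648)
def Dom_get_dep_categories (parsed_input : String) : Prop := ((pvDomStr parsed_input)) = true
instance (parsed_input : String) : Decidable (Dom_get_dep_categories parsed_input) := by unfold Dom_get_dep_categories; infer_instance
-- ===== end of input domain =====

-- B extracts the list of final tokens of the surviving lines once, then computes each
-- of the five counts as an independent aggregation over that list (alternative decomposition, same cost).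


-- ===== PORT A =====
-- one iteration of A's loop: the five counters, each bumped by its own `if` in A's order
def pvStepA (st : Int × Int × Int × Int × Int) (line : String) : Int × Int × Int × Int × Int :=
  let i := PySem.Str.strip line
  if i = "" then st
  else
    let parts := PySem.Str.split₀ i
    if parts.length < 4 then st
    else
      let rel := PySem.List.pyGetD parts (-1) ""
      match st with
      | (num_nsubj, num_obj, num_iobj, num_nmod, num_amod) =>
        (if PySem.Str.startswith rel "nsubj" then num_nsubj + 1 else num_nsubj,
         if rel == "obj" || rel == "dobj" || PySem.Str.startswith rel "obj:" || PySem.Str.startswith rel "dobj:"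
           then num_obj + 1 else num_obj,
         if PySem.Str.startswith rel "iobj" then num_iobj + 1 else num_iobj,
         if PySem.Str.startswith rel "nmod" then num_nmod + 1 else num_nmod,
         if PySem.Str.startswith rel "amod" then num_amod + 1 else num_amod)

def get_dep_categories (parsed_input : String) : Int × Int × Int × Int × Int :=
  (PySem.Str.splitlines parsed_input).foldl pvStepA (0, 0, 0, 0, 0)

-- ===== PORT B =====
-- B's extraction pass: the final token of every surviving line
def pvRel? (line : String) : Option String :=
  let parts := PySem.Str.split₀ (PySem.Str.strip line)
  if 4 ≤ parts.length then some (PySem.List.pyGetD parts (-1) "") else none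

def get_dep_categories_alt (parsed_input : String) : Int × Int × Int × Int × Int :=
  let rels := (PySem.Str.splitlines parsed_input).filterMap pvRel?
  ((rels.countP (fun r => PySem.Str.startswith r "nsubj") : Int),
   (rels.countP (fun r => r == "obj" || r == "dobj" ||
       PySem.Str.startswith r "obj:" || PySem.Str.startswith r "dobj:") : Int),
   (rels.countP (fun r => PySem.Str.startswith r "iobj") : Int),
   (rels.countP (fun r => PySem.Str.startswith r "nmod") : Int),
   (rels.countP (fun r => PySem.Str.startswith r "amod") : Int))

-- ===== PRECONDITION & SPEC =====
def Spec_get_dep_categories (parsed_input : String) (out : Int × Int × Int × Int × Int) : Prop := out = get_dep_categories_alt parsed_input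
instance (parsed_input : String) (out : Int × Int × Int × Int × Int) : Decidable (Spec_get_dep_categories parsed_input out) := by unfold Spec_get_dep_categories; infer_instance

-- ===== CLAIM (what is proved, stated in full; the proofs are below) =====
def Claim_equal_get_dep_categories : Prop := ∀ (parsed_input : String), Dom_get_dep_categories parsed_input → Spec_get_dep_categories parsed_input (get_dep_categories parsed_input)

-- ===== LEMMAS AND PROOFS =====

theorem pvStepA_of_none (st : Int × Int × Int × Int × Int) (line : String)
    (h : pvRel? line = none) : pvStepA st line = st := by
  unfold pvRel? at h
  unfold pvStepA
  by_cases hs : PySem.Str.strip line = ""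
  · simp [hs]
  · have hl : (PySem.Str.split₀ (PySem.Str.strip line)).length < 4 := by
      by_contra hc
      rw [if_pos (Nat.le_of_not_lt hc)] at h
      simp at h
    simp [hs, hl]

theorem pvStepA_of_some (a b c d e : Int) (line rel : String)
    (h : pvRel? line = some rel) :
    pvStepA (a, b, c, d, e) line =
      (if PySem.Str.startswith rel "nsubj" then a + 1 else a,
       if rel == "obj" || rel == "dobj" || PySem.Str.startswith rel "obj:" || PySem.Str.startswith rel "dobj:"
         then b + 1 else b,
       if PySem.Str.startswith rel "iobj" then c + 1 else c,
       if PySem.Str.startswith rel "nmod" then d + 1 else d,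
       if PySem.Str.startswith rel "amod" then e + 1 else e) := by
  unfold pvRel? at h
  by_cases hl : 4 ≤ (PySem.Str.split₀ (PySem.Str.strip line)).length
  · rw [if_pos hl] at h
    have hs : PySem.Str.strip line ≠ "" := by
      intro hs
      rw [hs] at hl
      simp [show PySem.Str.split₀ "" = [] from rfl] at hl
    unfold pvStepA
    rw [if_neg hs, if_neg (by omega)]
    simp only [Option.some.injEq] at h
    rw [h]
  · rw [if_neg hl] at h
    exact absurd h (by simp)

theorem pv_main (lines : List String) (a b c d e : Int) :
    lines.foldl pvStepA (a, b, c, d, e)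
    = (let rels := lines.filterMap pvRel?
       (a + (rels.countP (fun r => PySem.Str.startswith r "nsubj") : Int),
        b + (rels.countP (fun r => r == "obj" || r == "dobj" ||
            PySem.Str.startswith r "obj:" || PySem.Str.startswith r "dobj:") : Int),
        c + (rels.countP (fun r => PySem.Str.startswith r "iobj") : Int),
        d + (rels.countP (fun r => PySem.Str.startswith r "nmod") : Int),
        e + (rels.countP (fun r => PySem.Str.startswith r "amod") : Int))) := by
  induction lines generalizing a b c d e with
  | nil => simp
  | cons l ls ih =>
    simp only [List.foldl_cons, List.filterMap_cons]
    cases hg : pvRel? l with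
    | none => rw [pvStepA_of_none _ _ hg, ih]
    | some rel =>
      rw [pvStepA_of_some a b c d e l rel hg, ih]
      simp only [List.countP_cons, Prod.mk.injEq]
      refine ⟨?_, ?_, ?_, ?_, ?_⟩ <;> (split_ifs with h <;> push_cast <;> ring)

theorem get_dep_categories_eq (parsed_input : String) :
    get_dep_categories parsed_input = get_dep_categories_alt parsed_input := by
  unfold get_dep_categories get_dep_categories_alt
  rw [pv_main]
  simp

-- ===== VERDICT (by name: the statement is the Claim_ definition above) =====
theorem get_dep_categories_spec : Claim_equal_get_dep_categories := by
  intro p _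
  exact get_dep_categories_eq p
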